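-- pv_equiv track=rewrite | github.com/DFKI-NLP/InterroLang | actions/prediction/predict.py | handle_input
-- ===== SOURCE A (Python) =====
-- def handle_input(parse_text):
--     num = None
--     for item in parse_text:
--         try:
--             if int(item):
--                 num = int(item)
--         except:
--             pass
--     return num
-- ===== SOURCE B (Python) =====
-- def handle_input(parse_text):
--     for item in reversed(parse_text):
--         try:
--             v = int(item)
--         except:
--             continue
--         if v:
--             return v
--     return None
-- ===== Notes on version B (the rewrite author's own statement) =====
-- stated objective: alternative
-- what changed: Replaces A's forward pass that overwrites an accumulator with every nonzero parseable token by a reverse scan that returns the first nonzero parseable token immediately (early exit, no accumulator).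
import Mathlib
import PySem

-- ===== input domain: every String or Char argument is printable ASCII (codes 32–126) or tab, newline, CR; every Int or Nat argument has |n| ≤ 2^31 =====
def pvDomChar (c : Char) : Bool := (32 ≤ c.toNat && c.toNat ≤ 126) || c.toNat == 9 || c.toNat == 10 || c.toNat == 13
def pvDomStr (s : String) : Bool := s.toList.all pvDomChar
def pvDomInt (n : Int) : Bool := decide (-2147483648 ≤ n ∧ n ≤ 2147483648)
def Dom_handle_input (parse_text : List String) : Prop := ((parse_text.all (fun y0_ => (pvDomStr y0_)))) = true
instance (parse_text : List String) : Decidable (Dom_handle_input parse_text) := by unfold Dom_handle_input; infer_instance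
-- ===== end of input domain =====

-- B replaces A's forward overwrite-accumulator pass by a reverse early-exit search for the last nonzero parseable token (objective: alternative).


-- ===== PORT A =====
def handle_input (parse_text : List String) : Option Int :=
  parse_text.foldl (fun num item =>
    match PySem.Int.ofStr? item with
    | some v => if v != 0 then some v else num
    | none => num) none

-- ===== PORT B =====
-- step of B: the value this token contributes (some v for a nonzero parseable token)
def hiStep (item : String) : Option Int :=
  match PySem.Int.ofStr? item with
  | some v => if v != 0 then some v else none
  | none => none

-- reverse early-exit search (Source B's loop over reversed(parse_text))
def hiFindRev : List String → Option Int
  | [] => none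
  | t :: rest =>
    match hiStep t with
    | some v => some v
    | none => hiFindRev rest

def handle_input_alt (parse_text : List String) : Option Int :=
  hiFindRev parse_text.reverse

-- ===== PRECONDITION & SPEC =====
def Spec_handle_input (parse_text : List String) (out : Option Int) : Prop := out = handle_input_alt parse_text
instance (parse_text : List String) (out : Option Int) : Decidable (Spec_handle_input parse_text out) := by unfold Spec_handle_input; infer_instance

-- ===== CLAIM (what is proved, stated in full; the proofs are below) =====
def Claim_equal_handle_input : Prop := ∀ (parse_text : List String), Dom_handle_input parse_text → Spec_handle_input parse_text (handle_input parse_text)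

-- ===== LEMMAS AND PROOFS =====

lemma hiFindRev_append (xs : List String) (t : String) :
    hiFindRev (xs ++ [t]) = (hiFindRev xs).or (hiStep t) := by
  induction xs with
  | nil => cases h : hiStep t <;> simp [hiFindRev, h, Option.or]
  | cons x xs ih =>
    simp only [List.cons_append, hiFindRev]
    cases hiStep x <;> simp [Option.or, ih]

lemma hi_foldl_eq (xs : List String) (acc : Option Int) :
    xs.foldl (fun num item =>
      match PySem.Int.ofStr? item with
      | some v => if v != 0 then some v else num
      | none => num) acc = (hiFindRev xs.reverse).or acc := by
  induction xs generalizing acc with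
  | nil => simp [hiFindRev]
  | cons x xs ih =>
    simp only [List.foldl_cons, List.reverse_cons, hiFindRev_append, ih, Option.or_assoc]
    congr 1
    unfold hiStep
    cases h : PySem.Int.ofStr? x with
    | none => simp [Option.or]
    | some v =>
      by_cases hv : v = 0 <;> simp [hv, Option.or]

-- ===== VERDICT (by name: the statement is the Claim_ definition above) =====
theorem handle_input_spec : Claim_equal_handle_input := by
  intro parse_text _
  unfold Spec_handle_input handle_input handle_input_alt
  rw [hi_foldl_eq]
  cases hiFindRev parse_text.reverse <;> rfl
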